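-- pv_equiv track=rewrite | github.com/juanfraitu1/Rustle | scripts/full_bam_rustle_vs_stringtie_audit.py | aggregate_by_ref
-- ===== SOURCE A (Python) =====
-- from collections import Counter, defaultdict
--
-- def best_class_for_ref(classes: list[str]) -> str:
--     """One status per StringTie ref transcript: '=' wins; else pick a representative miss."""
--     if any(c == "=" for c in classes):
--         return "="
--     if not classes:
--         return "?"
--     # Prefer informative structural codes for reporting (not perfect ordering).
--     order = "ucnjomfpyxesrik"
--     ranked = sorted(set(classes), key=lambda c: (0 if c in order else 1, order.index(c) if c in order else 99))
--     return ranked[0]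
--
-- def aggregate_by_ref(rows: list[dict[str, str]]) -> tuple[Counter[str], Counter[str], dict[str, str]]:
--     """Returns (raw class counts, per-ref resolved counts, ref_id -> resolved class)."""
--     raw = Counter()
--     by_ref: dict[str, list[str]] = defaultdict(list)
--     for row in rows:
--         rid = row.get("ref_id", "").strip()
--         cc = row.get("class_code", "").strip()
--         if not rid or rid == "-":
--             continue
--         raw[cc] += 1
--         by_ref[rid].append(cc)
--     resolved: dict[str, str] = {rid: best_class_for_ref(cls) for rid, cls in by_ref.items()}
--     per_ref = Counter(resolved.values())
--     return raw, per_ref, resolved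
-- ===== SOURCE B (Python) =====
-- from collections import Counter
--
-- _ORDER = "ucnjomfpyxesrik"
--
-- def _cc_key(c: str) -> int:
--     if c == "=":
--         return -1
--     return _ORDER.index(c) if c in _ORDER else 100
--
-- def aggregate_by_ref(rows: list[dict[str, str]]) -> tuple:
--     """Single-pass running-best per ref: no per-ref class lists, no per-group sort."""
--     pairs = []
--     for row in rows:
--         rid = row.get("ref_id", "").strip()
--         cc = row.get("class_code", "").strip()
--         if rid and rid != "-":
--             pairs.append((rid, cc))
--     raw = Counter(cc for _, cc in pairs)
--     resolved: dict[str, str] = {}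
--     for rid, cc in pairs:
--         if rid not in resolved or _cc_key(cc) < _cc_key(resolved[rid]):
--             resolved[rid] = cc
--     per_ref = Counter(resolved.values())
--     return raw, per_ref, resolved
-- ===== Notes on version B (the rewrite author's own statement) =====
-- stated objective: alternative
-- what changed: B replaces A's two-phase grouping (bucket every class code into a defaultdict of per-ref lists, then resolve each list with sorted(set(...)) at the end) by one pass that keeps only a running best class per ref in a plain dict, with a single integer rank function; raw counts come from Counter over the collected valid pairs instead of incremental updates.
import Mathlib
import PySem

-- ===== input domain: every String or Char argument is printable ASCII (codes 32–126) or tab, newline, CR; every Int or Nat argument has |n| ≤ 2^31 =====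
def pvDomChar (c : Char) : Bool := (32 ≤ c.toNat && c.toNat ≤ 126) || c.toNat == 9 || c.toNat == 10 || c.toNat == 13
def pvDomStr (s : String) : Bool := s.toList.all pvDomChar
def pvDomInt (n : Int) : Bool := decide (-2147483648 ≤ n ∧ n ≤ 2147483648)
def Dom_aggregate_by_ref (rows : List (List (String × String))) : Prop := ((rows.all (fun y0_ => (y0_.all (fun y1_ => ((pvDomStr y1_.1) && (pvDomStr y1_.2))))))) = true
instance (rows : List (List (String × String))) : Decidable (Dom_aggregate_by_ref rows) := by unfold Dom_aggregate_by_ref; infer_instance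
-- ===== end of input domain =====

-- B replaces A's bucket-lists-then-resolve grouping by a single-pass running-best dict (no per-ref
-- class lists, no per-group sort); objective: alternative/simpler decomposition, same results.

-- ===== PORT A =====
def pvOrder : String := "ucnjomfpyxesrik"

def pvRowRid (row : List (String × String)) : String :=
  PySem.Str.strip ((PySem.Dict.mk row).getD "ref_id" "")

def pvRowCc (row : List (String × String)) : String :=
  PySem.Str.strip ((PySem.Dict.mk row).getD "class_code" "")

def best_class_for_ref (classes : List String) : String :=
  if classes.any (fun c => c == "=") then "="
  else if classes.isEmpty then "?"
  else
    PySem.List.pyGetD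
      (PySem.List.sorted2 (PySem.Set.ofList classes)
        (fun c => if PySem.Str.isIn c pvOrder then (0 : Int) else 1)
        (fun c => if PySem.Str.isIn c pvOrder then PySem.Str.find pvOrder c else 99))
      0 "?"

def pvStepA (st : PySem.Dict String Int × PySem.Dict String (List String))
    (row : List (String × String)) :
    PySem.Dict String Int × PySem.Dict String (List String) :=
  let rid := pvRowRid row
  let cc := pvRowCc row
  if rid = "" ∨ rid = "-" then st
  else (st.1.modify cc 0 (· + 1), st.2.modify rid [] (· ++ [cc]))

def aggregate_by_ref (rows : List (List (String × String))) :
    (List (String × Int)) × (List (String × Int)) × (List (String × String)) :=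
  let st := rows.foldl pvStepA (PySem.Dict.empty, PySem.Dict.empty)
  let resolved := st.2.items.foldl
    (fun d p => d.insert p.1 (best_class_for_ref p.2)) PySem.Dict.empty
  let per_ref := PySem.Dict.counter resolved.values
  (st.1.items, per_ref.items, resolved.items)

-- ===== PORT B =====
def pvCcKey (c : String) : Int :=
  if c = "=" then -1
  else if PySem.Str.isIn c pvOrder then PySem.Str.find pvOrder c else 100

def pvStepB (d : PySem.Dict String String) (p : String × String) : PySem.Dict String String :=
  if !d.contains p.1 || decide (pvCcKey p.2 < pvCcKey (d.getD p.1 "")) then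
    d.insert p.1 p.2
  else d

def aggregate_by_ref_alt (rows : List (List (String × String))) :
    (List (String × Int)) × (List (String × Int)) × (List (String × String)) :=
  let pairs := rows.foldl (fun acc row =>
      if pvRowRid row ≠ "" ∧ pvRowRid row ≠ "-" then acc ++ [(pvRowRid row, pvRowCc row)]
      else acc) []
  let raw := PySem.Dict.counter (pairs.map (·.2))
  let resolved := pairs.foldl pvStepB PySem.Dict.empty
  let per_ref := PySem.Dict.counter resolved.values
  (raw.items, per_ref.items, resolved.items)

-- ===== PRECONDITION & SPEC =====
def pvPairs (rows : List (List (String × String))) : List (String × String) :=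
  rows.flatMap (fun row =>
    if pvRowRid row ≠ "" ∧ pvRowRid row ≠ "-" then [(pvRowRid row, pvRowCc row)] else [])

-- Pre_ excludes inputs where, for some ref id whose class list has no "=", two DISTINCT class codes
-- tie on A's sort key: there A's answer comes from `sorted(set(...))` and so depends on Python's
-- hash-randomised set iteration order (A literally returns different values under different
-- PYTHONHASHSEED values), so neither value can be specified.
def Pre_aggregate_by_ref (rows : List (List (String × String))) : Prop :=
  ∀ p ∈ pvPairs rows, ∀ q ∈ pvPairs rows,
    p.1 = q.1 → p.2 ≠ q.2 → pvCcKey p.2 = pvCcKey q.2 → (p.1, "=") ∈ pvPairs rows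

instance (rows : List (List (String × String))) : Decidable (Pre_aggregate_by_ref rows) := by
  unfold Pre_aggregate_by_ref; infer_instance

def pvWitness_aggregate_by_ref : (List (List (String × String))) :=
  [[("ref_id", "r1"), ("class_code", "=")], [("ref_id", "r1"), ("class_code", "j")],
   [("ref_id", "r2"), ("class_code", "xx")]]

def Spec_aggregate_by_ref (rows : List (List (String × String)))
    (out : (List (String × Int)) × (List (String × Int)) × (List (String × String))) : Prop :=
  out = aggregate_by_ref_alt rows

instance (rows : List (List (String × String)))
    (out : (List (String × Int)) × (List (String × Int)) × (List (String × String))) :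
    Decidable (Spec_aggregate_by_ref rows out) := by
  unfold Spec_aggregate_by_ref; infer_instance

-- ===== CLAIM (what is proved, stated in full; the proofs are below) =====
def Claim_equal_aggregate_by_ref : Prop :=
  ∀ (rows : List (List (String × String))), Dom_aggregate_by_ref rows →
    Pre_aggregate_by_ref rows → Spec_aggregate_by_ref rows (aggregate_by_ref rows)

-- ===== LEMMAS AND PROOFS =====

-- running minimum used to characterise B's dict entries
def pvMerge (b c : String) : String := if pvCcKey c < pvCcKey b then c else b

def pvBmin : List String → String
  | [] => "?"
  | c :: cs => cs.foldl pvMerge c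

theorem pvBmin_mem (cs : List String) (b : String) : cs.foldl pvMerge b ∈ b :: cs := by
  induction cs generalizing b with
  | nil => simp
  | cons c cs ih =>
    simp only [List.foldl_cons]
    rcases List.mem_cons.1 (ih (pvMerge b c)) with h | h
    · rw [h]; unfold pvMerge; split_ifs <;> simp
    · simp [h]

theorem pvBmin_le (cs : List String) (b : String) :
    pvCcKey (cs.foldl pvMerge b) ≤ pvCcKey b ∧
      ∀ c ∈ cs, pvCcKey (cs.foldl pvMerge b) ≤ pvCcKey c := by
  induction cs generalizing b with
  | nil => simp
  | cons c cs ih =>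
    have h := ih (pvMerge b c)
    simp only [List.foldl_cons, List.mem_cons]
    refine ⟨?_, ?_⟩
    · refine le_trans h.1 ?_
      unfold pvMerge; split_ifs with hlt <;> omega
    · rintro x (rfl | hx)
      · refine le_trans h.1 ?_
        unfold pvMerge; split_ifs with hlt <;> omega
      · exact h.2 x hx

theorem pvBmin_snoc (g : List String) (c : String) (h : g ≠ []) :
    pvBmin (g ++ [c]) = pvMerge (pvBmin g) c := by
  cases g with
  | nil => exact absurd rfl h
  | cons b cs => simp [pvBmin, List.foldl_append]

theorem pvCcKey_eq_neg_one (c : String) (h : pvCcKey c ≤ -1) : c = "=" := by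
  by_contra hne
  unfold pvCcKey at h
  rw [if_neg hne] at h
  split_ifs at h with h2
  · have h3 := (PySem.Str.find_nonneg_iff pvOrder c).2 ((PySem.Str.isIn_iff_infix c pvOrder).1 h2)
    omega
  · omega

theorem pvInsertBy_congr (b1 b2 : String → String → Bool) (x : String) (ys : List String)
    (h : ∀ a, a ∈ x :: ys → ∀ a', a' ∈ x :: ys → b1 a a' = b2 a a') :
    PySem.List.insertBy b1 x ys = PySem.List.insertBy b2 x ys := by
  induction ys with
  | nil => rfl
  | cons y ys ih =>
    have hxy : b1 x y = b2 x y := h x (by simp) y (by simp)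
    simp only [PySem.List.insertBy, hxy]
    split_ifs with hb
    · rfl
    · have := ih (fun a ha a' ha' => by
        refine h a ?_ a' ?_ <;> simp only [List.mem_cons] at ha ha' ⊢ <;> tauto)
      simp only [this]

theorem pvFoldl_insertBy_congr (b1 b2 : String → String → Bool) :
    ∀ (xs acc : List String),
      (∀ a, (a ∈ acc ∨ a ∈ xs) → ∀ a', (a' ∈ acc ∨ a' ∈ xs) → b1 a a' = b2 a a') →
      xs.foldl (fun ac x => PySem.List.insertBy b1 x ac) acc
        = xs.foldl (fun ac x => PySem.List.insertBy b2 x ac) acc := by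
  intro xs
  induction xs with
  | nil => intro acc h; rfl
  | cons x xs ih =>
    intro acc h
    simp only [List.foldl_cons]
    have hmem : ∀ z : String, z ∈ PySem.List.insertBy b2 x acc ∨ z ∈ xs → z ∈ acc ∨ z ∈ x :: xs := by
      intro z hz
      rcases hz with hz | hz
      · rcases (PySem.List.mem_insertBy b2 x z acc).1 hz with rfl | hz2
        · exact Or.inr (List.mem_cons_self ..)
        · exact Or.inl hz2
      · exact Or.inr (List.mem_cons_of_mem _ hz)
    have hins : PySem.List.insertBy b1 x acc = PySem.List.insertBy b2 x acc := by
      refine pvInsertBy_congr b1 b2 x acc (fun a ha a' ha' => ?_)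
      simp only [List.mem_cons] at ha ha'
      have f : ∀ z : String, z = x ∨ z ∈ acc → z ∈ acc ∨ z ∈ x :: xs := by
        rintro z (rfl | hz)
        · exact Or.inr (by simp)
        · exact Or.inl hz
      exact h a (f a ha) a' (f a' ha')
    rw [hins]
    exact ih (PySem.List.insertBy b2 x acc)
      (fun a ha a' ha' => h a (hmem a ha) a' (hmem a' ha'))

theorem pvFind_bounds (c : String) (h : PySem.Str.isIn c pvOrder = true) :
    0 ≤ PySem.Str.find pvOrder c ∧ PySem.Str.find pvOrder c ≤ 15 := by
  have h1 := (PySem.Str.find_nonneg_iff pvOrder c).2 ((PySem.Str.isIn_iff_infix c pvOrder).1 h)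
  have h2 := PySem.Chars.find_le_length pvOrder.toList c.toList
  have h3 : pvOrder.toList.length = 15 := by decide
  rw [h3] at h2
  refine ⟨h1, ?_⟩
  rw [PySem.Str.find_eq]
  exact_mod_cast h2

theorem pvBefore_agree (a b : String) (ha : a ≠ "=") (hb : b ≠ "=") :
    ((decide ((if PySem.Str.isIn a pvOrder then (0:Int) else 1) < (if PySem.Str.isIn b pvOrder then (0:Int) else 1))) ||
      (!(decide ((if PySem.Str.isIn b pvOrder then (0:Int) else 1) < (if PySem.Str.isIn a pvOrder then (0:Int) else 1))) &&
        decide ((if PySem.Str.isIn a pvOrder then PySem.Str.find pvOrder a else 99) < (if PySem.Str.isIn b pvOrder then PySem.Str.find pvOrder b else 99))))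
    = decide (pvCcKey a < pvCcKey b) := by
  unfold pvCcKey
  rw [if_neg ha, if_neg hb]
  cases h1 : PySem.Str.isIn a pvOrder <;> cases h2 : PySem.Str.isIn b pvOrder <;>
    simp only [Bool.false_eq_true, if_true, if_false] <;>
    rw [Bool.eq_iff_iff] <;>
    simp only [Bool.or_eq_true, Bool.and_eq_true, Bool.not_eq_true', decide_eq_true_eq,
      decide_eq_false_iff_not]
  · omega
  · have := pvFind_bounds b h2; omega
  · have := pvFind_bounds a h1; omega
  · omega

theorem pvSorted2_eq_sorted (S : List String) (hS : ∀ c ∈ S, c ≠ "=") :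
    PySem.List.sorted2 S
      (fun c => if PySem.Str.isIn c pvOrder then (0 : Int) else 1)
      (fun c => if PySem.Str.isIn c pvOrder then PySem.Str.find pvOrder c else 99) false
    = PySem.List.sorted S pvCcKey false := by
  rw [PySem.List.sorted_eq_foldl_insertBy]
  show S.foldl (fun acc x => PySem.List.insertBy _ x acc) [] = _
  refine pvFoldl_insertBy_congr _ _ S [] (fun a hma a' hma' => ?_)
  have ha : a ∈ S := by simpa using hma
  have ha' : a' ∈ S := by simpa using hma' 
  exact pvBefore_agree a a' (hS a ha) (hS a' ha')

-- core: on any non-empty group whose distinct classes have distinct keys (unless "=" occurs),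
-- A's resolver equals B's running minimum
theorem pvBest_eq_bmin (g : List String) (hne : g ≠ [])
    (H : ∀ c1 ∈ g, ∀ c2 ∈ g, c1 ≠ c2 → pvCcKey c1 = pvCcKey c2 → "=" ∈ g) :
    best_class_for_ref g = pvBmin g := by
  obtain ⟨b, cs, rfl⟩ : ∃ b cs, g = b :: cs := by
    cases g with
    | nil => exact absurd rfl hne
    | cons b cs => exact ⟨_, _, rfl⟩
  have hm_mem : pvBmin (b :: cs) ∈ b :: cs := pvBmin_mem cs b
  have hm_le : ∀ c ∈ b :: cs, pvCcKey (pvBmin (b :: cs)) ≤ pvCcKey c := by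
    intro c hc
    rcases List.mem_cons.1 hc with rfl | hc
    · exact (pvBmin_le cs c).1
    · exact (pvBmin_le cs b).2 c hc
  by_cases he : "=" ∈ b :: cs
  · have hany : (b :: cs).any (fun c => c == "=") = true := by
      rw [List.any_eq_true]; exact ⟨"=", he, by simp⟩
    have hkey : pvCcKey (pvBmin (b :: cs)) ≤ -1 := by
      have := hm_le "=" he
      simpa [pvCcKey] using this
    rw [best_class_for_ref, if_pos hany, pvCcKey_eq_neg_one _ hkey]
  · have hany : (b :: cs).any (fun c => c == "=") = false := by
      rw [Bool.eq_false_iff, Ne, List.any_eq_true]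
      rintro ⟨x, hx, hx2⟩
      rw [beq_iff_eq] at hx2
      exact he (hx2 ▸ hx)
    have hSsub : ∀ c ∈ PySem.Set.ofList (b :: cs), c ∈ b :: cs :=
      fun c hc => (PySem.Set.mem_ofList _ c).1 hc
    have hSne : ∀ c ∈ PySem.Set.ofList (b :: cs), c ≠ "=" := by
      rintro c hc rfl; exact he (hSsub _ hc)
    rw [best_class_for_ref, if_neg (by simp [hany]), if_neg (by simp)]
    rw [pvSorted2_eq_sorted _ hSne]
    cases hs : PySem.List.sorted (PySem.Set.ofList (b :: cs)) pvCcKey false with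
    | nil =>
      exfalso
      have : PySem.Set.ofList (b :: cs) = [] :=
        (PySem.List.sorted_eq_nil_iff _ _ _).1 hs
      have hb : b ∈ PySem.Set.ofList (b :: cs) := (PySem.Set.mem_ofList _ b).2 (by simp)
      rw [this] at hb; exact absurd hb (List.not_mem_nil)
    | cons hd tl =>
      rw [PySem.List.pyGetD_zero_cons]
      have hhd_mem : hd ∈ b :: cs := by
        refine hSsub hd ?_
        have : hd ∈ PySem.List.sorted (PySem.Set.ofList (b :: cs)) pvCcKey false := by
          rw [hs]; simp
        exact (PySem.List.mem_sorted _ _ _ _).1 this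
      have hle : pvCcKey hd ≤ pvCcKey (pvBmin (b :: cs)) := by
        refine PySem.List.key_head_sorted_le _ pvCcKey hs _ ?_
        exact (PySem.Set.mem_ofList _ _).2 hm_mem
      have hge : pvCcKey (pvBmin (b :: cs)) ≤ pvCcKey hd := hm_le hd hhd_mem
      by_contra hneq
      exact he (H hd hhd_mem (pvBmin (b :: cs)) hm_mem hneq (le_antisymm hle hge))

-- A's single loop splits into two folds over the valid (rid, cc) pairs
theorem pvLoopA_split : ∀ (rows : List (List (String × String)))
    (st : PySem.Dict String Int × PySem.Dict String (List String)),
    rows.foldl pvStepA st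
      = ((pvPairs rows).foldl (fun d p => d.modify p.2 0 (· + 1)) st.1,
         (pvPairs rows).foldl (fun d p => d.modify p.1 [] (· ++ [p.2])) st.2) := by
  intro rows
  induction rows with
  | nil => intro st; simp [pvPairs]
  | cons row rest ih =>
    intro st
    rw [List.foldl_cons, ih]
    have hp : pvPairs (row :: rest)
        = (if pvRowRid row ≠ "" ∧ pvRowRid row ≠ "-" then [(pvRowRid row, pvRowCc row)] else [])
          ++ pvPairs rest := by
      simp [pvPairs]
    by_cases hc : pvRowRid row = "" ∨ pvRowRid row = "-"
    · have h1 : pvStepA st row = st := by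
        rw [pvStepA]; exact if_pos hc
      have h2 : ¬ (pvRowRid row ≠ "" ∧ pvRowRid row ≠ "-") := by
        rintro ⟨hA, hB⟩
        rcases hc with h | h
        exacts [hA h, hB h]
      rw [h1, hp, if_neg h2, List.nil_append]
    · have h2 : pvRowRid row ≠ "" ∧ pvRowRid row ≠ "-" :=
        ⟨fun h => hc (Or.inl h), fun h => hc (Or.inr h)⟩
      have h1 : pvStepA st row
          = (st.1.modify (pvRowCc row) 0 (· + 1),
             st.2.modify (pvRowRid row) [] (· ++ [pvRowCc row])) := by
        rw [pvStepA]; exact if_neg hc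
      rw [h1, hp, if_pos h2, List.cons_append, List.nil_append, List.foldl_cons,
        List.foldl_cons]

-- B's first loop computes pvPairs
theorem pvLoopB_pairs : ∀ (rows : List (List (String × String))) (acc : List (String × String)),
    rows.foldl (fun acc row =>
      if pvRowRid row ≠ "" ∧ pvRowRid row ≠ "-" then acc ++ [(pvRowRid row, pvRowCc row)]
      else acc) acc = acc ++ pvPairs rows := by
  intro rows
  induction rows with
  | nil => intro acc; simp [pvPairs]
  | cons row rest ih =>
    intro acc
    rw [List.foldl_cons]
    by_cases hc : pvRowRid row ≠ "" ∧ pvRowRid row ≠ "-"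
    · rw [if_pos hc, ih]
      simp [pvPairs, hc]
    · rw [if_neg hc, ih]
      simp [pvPairs, if_neg hc]

-- invariant: B's dict is A's bucket dict with every bucket replaced by its running minimum
theorem pvInvariant : ∀ (l : List (String × String))
    (dA : PySem.Dict String (List String)) (dB : PySem.Dict String String),
    dA.keys.Nodup →
    dB.items = dA.items.map (fun p => (p.1, pvBmin p.2)) →
    (∀ p ∈ dA.items, p.2 ≠ []) →
    (l.foldl (fun d p => d.modify p.1 [] (· ++ [p.2])) dA).keys.Nodup ∧
    (l.foldl pvStepB dB).items
      = (l.foldl (fun d p => d.modify p.1 [] (· ++ [p.2])) dA).items.map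
          (fun p => (p.1, pvBmin p.2)) ∧
    (∀ p ∈ (l.foldl (fun d p => d.modify p.1 [] (· ++ [p.2])) dA).items, p.2 ≠ []) := by
  intro l
  induction l with
  | nil => intro dA dB h1 h2 h3; exact ⟨h1, h2, h3⟩
  | cons p l ih =>
    intro dA dB h1 h2 h3
    simp only [List.foldl_cons]
    have hkeys : dB.keys = dA.keys := by
      show dB.items.map Prod.fst = dA.items.map Prod.fst
      rw [h2, List.map_map]
      rfl
    have hcont : dB.contains p.1 = dA.contains p.1 := by
      rw [PySem.Dict.contains_eq_decide_mem_keys, PySem.Dict.contains_eq_decide_mem_keys, hkeys]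
    by_cases hc : dA.contains p.1 = true
    · -- key already present
      have hgmem : (p.1, dA.getD p.1 []) ∈ dA.items := by
        rw [PySem.Dict.items_eq_map_keys dA h1 []]
        exact List.mem_map_of_mem ((PySem.Dict.contains_iff_mem_keys dA p.1).1 hc)
      have hgne : dA.getD p.1 [] ≠ [] := h3 _ hgmem
      have hBmem : (p.1, pvBmin (dA.getD p.1 [])) ∈ dB.items := by
        rw [h2]
        exact List.mem_map_of_mem hgmem
      have hBnodup : dB.keys.Nodup := by rw [hkeys]; exact h1
      have hBgd : dB.getD p.1 "" = pvBmin (dA.getD p.1 []) :=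
        PySem.Dict.getD_of_mem_items dB hBmem hBnodup ""
      have hAstep : dA.modify p.1 [] (· ++ [p.2]) = dA.insert p.1 (dA.getD p.1 [] ++ [p.2]) :=
        rfl
      have hAitems := PySem.Dict.items_insert_of_contains dA (dA.getD p.1 [] ++ [p.2]) hc
      have hAkeys : (dA.insert p.1 (dA.getD p.1 [] ++ [p.2])).keys = dA.keys :=
        PySem.Dict.keys_insert_of_contains dA _ hc
      have hBstep : pvStepB dB p
          = if pvCcKey p.2 < pvCcKey (pvBmin (dA.getD p.1 [])) then dB.insert p.1 p.2 else dB := by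
        rw [pvStepB, hcont, hc, hBgd]
        simp only [Bool.not_true, Bool.false_or, decide_eq_true_eq]
      refine ih _ _ ?_ ?_ ?_
      · rw [hAstep, hAkeys]; exact h1
      · rw [hBstep, hAstep, hAitems]
        by_cases hlt : pvCcKey p.2 < pvCcKey (pvBmin (dA.getD p.1 []))
        · rw [if_pos hlt, PySem.Dict.items_insert_of_contains dB p.2 (by rw [hcont]; exact hc),
            h2, List.map_map, List.map_map]
          refine List.map_congr_left (fun q hq => ?_)
          simp only [Function.comp]
          by_cases hq1 : q.1 = p.1
          · rw [if_pos (by simpa using hq1), if_pos (by simpa using hq1)]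
            have : pvBmin (dA.getD p.1 [] ++ [p.2]) = p.2 := by
              rw [pvBmin_snoc _ _ hgne, pvMerge, if_pos hlt]
            rw [this]
          · rw [if_neg (by simpa using hq1), if_neg (by simpa using hq1)]
        · rw [if_neg hlt, h2, List.map_map]
          refine List.map_congr_left (fun q hq => ?_)
          simp only [Function.comp]
          by_cases hq1 : q.1 = p.1
          · rw [if_pos (by simpa using hq1)]
            have hq2 : q.2 = dA.getD p.1 [] := by
              have := PySem.Dict.getD_of_mem_items dA (k := q.1) (v := q.2) (by simpa using hq) h1 []
              rw [hq1] at this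
              rw [← this]
            have : pvBmin (dA.getD p.1 [] ++ [p.2]) = pvBmin (dA.getD p.1 [])  := by
              rw [pvBmin_snoc _ _ hgne, pvMerge, if_neg hlt]
            rw [this, ← hq2, ← hq1]
          · rw [if_neg (by simpa using hq1)]
      · rw [hAstep, hAitems]
        intro q hq
        rcases List.mem_map.1 hq with ⟨r, hr, hrq⟩
        by_cases hr1 : r.1 = p.1
        · rw [if_pos (by simpa using hr1)] at hrq
          rw [← hrq]
          simp
        · rw [if_neg (by simpa using hr1)] at hrq
          exact hrq ▸ h3 r hr
    · -- fresh key
      have hc' : dA.contains p.1 = false := by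
        cases h : dA.contains p.1
        · rfl
        · exact absurd h hc
      have hgd : dA.getD p.1 [] = [] := PySem.Dict.getD_of_not_contains dA [] hc'
      have hAstep : dA.modify p.1 [] (· ++ [p.2]) = dA.insert p.1 [p.2] := by
        show dA.insert p.1 (dA.getD p.1 [] ++ [p.2]) = _
        rw [hgd]
        rfl
      have hBstep : pvStepB dB p = dB.insert p.1 p.2 := by
        rw [pvStepB, hcont, hc']
        rfl
      have hnotmem : p.1 ∉ dA.keys := fun hmem =>
        hc ((PySem.Dict.contains_iff_mem_keys dA p.1).2 hmem)
      refine ih _ _ ?_ ?_ ?_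
      · rw [hAstep, PySem.Dict.keys_insert_of_not_contains dA _ hc']
        rw [List.nodup_append]
        refine ⟨h1, List.nodup_singleton _, ?_⟩
        intro a ha b hb heq
        rw [List.mem_singleton] at hb
        exact hnotmem ((heq.trans hb) ▸ ha)
      · rw [hBstep, hAstep, PySem.Dict.items_insert_of_not_contains dA _ hc',
          PySem.Dict.items_insert_of_not_contains dB _ (by rw [hcont]; exact hc'),
          h2, List.map_append]
        rfl
      · rw [hAstep, PySem.Dict.items_insert_of_not_contains dA _ hc']
        intro q hq
        rcases List.mem_append.1 hq with hq | hq
        · exact h3 q hq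
        · simp only [List.mem_singleton] at hq
          rw [hq]
          simp

-- ===== VERDICT (by name: the statement is the Claim_ definition above) =====
theorem pvGroup_best (rows : List (List (String × String)))
    (hpre : Pre_aggregate_by_ref rows) (q : String × List String)
    (hq : q ∈ ((pvPairs rows).foldl
      (fun d p => d.modify p.1 [] (· ++ [p.2])) PySem.Dict.empty).items) :
    best_class_for_ref q.2 = pvBmin q.2 := by
  have hinv := pvInvariant (pvPairs rows) PySem.Dict.empty PySem.Dict.empty
    (by simp [PySem.Dict.keys_empty]) (rfl) (by intro p hp; simp [PySem.Dict.empty] at hp)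
  have hnodup := hinv.1
  have hne : q.2 ≠ [] := hinv.2.2 q hq
  have hgd : q.2 = (List.filter (fun p => p.1 == q.1) (pvPairs rows)).map (·.2) := by
    have h1 : ((pvPairs rows).foldl
        (fun d p => d.modify p.1 [] (· ++ [p.2])) PySem.Dict.empty).getD q.1 [] = q.2 := by
      refine PySem.Dict.getD_of_mem_items _ ?_ hnodup []
      exact (Prod.mk.eta (p := q)) ▸ hq
    rw [← h1, PySem.Dict.getD_foldl_modify_append]
    simp [PySem.Dict.getD_empty]
  have hmem : ∀ c ∈ q.2, (q.1, c) ∈ pvPairs rows := by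
    intro c hc
    rw [hgd] at hc
    rcases List.mem_map.1 hc with ⟨pr, hpr, hpr2⟩
    have := List.mem_filter.1 hpr
    have h4 : pr.1 = q.1 := by simpa using this.2
    have h6 : pr = (q.1, c) := by
      rw [← h4, ← hpr2]
    exact h6 ▸ this.1
  refine pvBest_eq_bmin q.2 hne ?_
  intro c1 hc1 c2 hc2 hne12 hkeq
  have h5 := hpre (q.1, c1) (hmem c1 hc1) (q.1, c2) (hmem c2 hc2) rfl (by simpa using hne12)
    (by simpa using hkeq)
  -- (q.1, "=") ∈ pvPairs rows ⟹ "=" ∈ q.2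
  rw [hgd]
  refine List.mem_map.2 ⟨(q.1, "="), ?_, rfl⟩
  exact List.mem_filter.2 ⟨h5, by simp⟩

theorem aggregate_by_ref_spec : Claim_equal_aggregate_by_ref := by
  intro rows _ hpre
  unfold Spec_aggregate_by_ref
  simp only [aggregate_by_ref, aggregate_by_ref_alt]
  rw [pvLoopA_split, pvLoopB_pairs, List.nil_append]
  have hfix1 : ((PySem.Dict.empty, PySem.Dict.empty) :
      PySem.Dict String Int × PySem.Dict String (List String)).1 = PySem.Dict.empty := rfl
  have hfix2 : ((PySem.Dict.empty, PySem.Dict.empty) :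
      PySem.Dict String Int × PySem.Dict String (List String)).2 = PySem.Dict.empty := rfl
  rw [hfix1, hfix2]
  have hinv := pvInvariant (pvPairs rows) PySem.Dict.empty PySem.Dict.empty
    (by simp [PySem.Dict.keys_empty]) rfl (by intro p hp; simp [PySem.Dict.empty] at hp)
  have hraw : List.foldl (fun d p => d.modify p.2 0 fun x => x + 1)
      (PySem.Dict.empty : PySem.Dict String Int) (pvPairs rows)
      = PySem.Dict.counter (List.map (fun x => x.2) (pvPairs rows)) := by
    rw [PySem.Dict.counter_eq_foldl, List.foldl_map]
  have hAres : (List.foldl (fun d p => d.insert p.1 (best_class_for_ref p.2)) PySem.Dict.empty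
      (List.foldl (fun d p => d.modify p.1 [] fun x => x ++ [p.2]) PySem.Dict.empty
        (pvPairs rows)).items).items
      = ((List.foldl (fun d p => d.modify p.1 [] fun x => x ++ [p.2]) PySem.Dict.empty
          (pvPairs rows)).items).map (fun p => (p.1, best_class_for_ref p.2)) := by
    have hnodupmap : (List.map (fun p => (p : String × List String).1)
        (List.foldl (fun d p => d.modify p.1 [] fun x => x ++ [p.2]) PySem.Dict.empty
          (pvPairs rows)).items).Nodup := hinv.1
    have hfresh := PySem.Dict.items_foldl_insert_fresh
      (l := (List.foldl (fun d p => d.modify p.1 [] fun x => x ++ [p.2]) PySem.Dict.empty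
        (pvPairs rows)).items)
      (k := fun p => p.1) (v := fun p => best_class_for_ref p.2) (d := PySem.Dict.empty)
      (fun a _ => rfl) hnodupmap
    simpa using hfresh
  have hmapeq : ((List.foldl (fun d p => d.modify p.1 [] fun x => x ++ [p.2]) PySem.Dict.empty
        (pvPairs rows)).items).map (fun p => (p.1, best_class_for_ref p.2))
      = ((List.foldl (fun d p => d.modify p.1 [] fun x => x ++ [p.2]) PySem.Dict.empty
        (pvPairs rows)).items).map (fun p => (p.1, pvBmin p.2)) :=
    List.map_congr_left (fun q hq => by rw [pvGroup_best rows hpre q hq])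
  have hres : List.foldl (fun d p => d.insert p.1 (best_class_for_ref p.2)) PySem.Dict.empty
      (List.foldl (fun d p => d.modify p.1 [] fun x => x ++ [p.2]) PySem.Dict.empty
        (pvPairs rows)).items
      = List.foldl pvStepB PySem.Dict.empty (pvPairs rows) :=
    PySem.Dict.ext (hAres.trans (hmapeq.trans hinv.2.1.symm))
  rw [hraw, hres]
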